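-- pv_equiv track=rewrite | github.com/semosso/mit-6100l | lectures/lec16.py | in_lists_of_list
-- ===== SOURCE A (Python) =====
-- def in_lists_of_list(L, e):
--     """
--     L is a list whose elements are lists containing ints
--     Returns True if e is an element within sublists of L
--     and False otherwise.
--     """
--     if len(L) == 1:
--         return e in L[0]
--     else:
--         if e in L[0]:
--             return True
--         else:
--             return in_lists_of_list(L[1:], e)
-- ===== SOURCE B (Python) =====
-- def in_lists_of_list(L, e):
--     return any(e in sub for sub in L)
-- ===== Notes on version B (the rewrite author's own statement) =====
-- stated objective: idiomatic
-- what changed: Replaces the tail recursion with slicing (L[1:]) by a single any() over the sublists.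
import Mathlib
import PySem

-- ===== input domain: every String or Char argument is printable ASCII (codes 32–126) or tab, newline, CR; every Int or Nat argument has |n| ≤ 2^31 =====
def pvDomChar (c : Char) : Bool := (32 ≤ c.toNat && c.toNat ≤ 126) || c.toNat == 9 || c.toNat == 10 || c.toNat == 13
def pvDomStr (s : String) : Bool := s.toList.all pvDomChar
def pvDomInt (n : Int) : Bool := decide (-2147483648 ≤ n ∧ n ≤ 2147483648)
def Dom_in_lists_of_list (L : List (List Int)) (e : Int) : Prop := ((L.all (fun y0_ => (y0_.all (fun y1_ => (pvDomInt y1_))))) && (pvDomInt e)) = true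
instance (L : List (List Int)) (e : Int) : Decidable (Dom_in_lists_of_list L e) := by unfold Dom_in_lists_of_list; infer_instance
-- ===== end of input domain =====

-- B replaces the tail recursion with an any() over the sublists; equivalence is about the return value only.
-- ===== PORT A =====
-- A recurses: len(L)==1 → e in L[0]; else e in L[0] or recurse on L[1:]. On L = [] Python
-- raises IndexError (excluded by Pre_); the port returns false there, outside the claim.
def in_lists_of_list (L : List (List Int)) (e : Int) : Bool :=
  match L with
  | [] => false
  | [x] => x.contains e
  | x :: rest => if x.contains e then true else in_lists_of_list rest e

-- ===== PORT B =====
def in_lists_of_list_alt (L : List (List Int)) (e : Int) : Bool :=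
  L.any (fun sub => sub.contains e)

-- ===== PRECONDITION & SPEC =====
-- Pre_ excludes only the empty list, on which A raises IndexError (it indexes L[0]); B returns False there.
def Pre_in_lists_of_list (L : List (List Int)) (e : Int) : Prop := L ≠ []
instance (L : List (List Int)) (e : Int) : Decidable (Pre_in_lists_of_list L e) := by unfold Pre_in_lists_of_list; infer_instance
def pvWitness_in_lists_of_list : List (List Int) × Int := ([[1, 2], [3]], 3)

def Spec_in_lists_of_list (L : List (List Int)) (e : Int) (out : Bool) : Prop := out = in_lists_of_list_alt L e
instance (L : List (List Int)) (e : Int) (out : Bool) : Decidable (Spec_in_lists_of_list L e out) := by unfold Spec_in_lists_of_list; infer_instance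

-- ===== CLAIM (what is proved, stated in full; the proofs are below) =====
def Claim_equal_in_lists_of_list : Prop := ∀ (L : List (List Int)) (e : Int), Dom_in_lists_of_list L e → Pre_in_lists_of_list L e → Spec_in_lists_of_list L e (in_lists_of_list L e)

-- ===== LEMMAS AND PROOFS =====
theorem in_lists_main (L : List (List Int)) (e : Int) (h : L ≠ []) :
    in_lists_of_list L e = in_lists_of_list_alt L e := by
  induction L with
  | nil => exact absurd rfl h
  | cons x rest ih =>
    cases rest with
    | nil => simp [in_lists_of_list, in_lists_of_list_alt]
    | cons y r =>
      rw [show in_lists_of_list (x :: y :: r) e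
            = if x.contains e then true else in_lists_of_list (y :: r) e from rfl]
      rw [ih (by simp)]
      by_cases hx : x.contains e = true <;>
        simp [in_lists_of_list_alt]

-- ===== VERDICT (by name: the statement is the Claim_ definition above) =====
theorem in_lists_of_list_spec : Claim_equal_in_lists_of_list := by
  intro L e _ hpre
  exact in_lists_main L e hpre
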